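-- pv_equiv track=rewrite | github.com/ls-2018/py | Python程序员面试算法宝典/数组/25、任务调度.py | calculate_process_time
-- ===== SOURCE A (Python) =====
-- def calculate_process_time(t, n):
--     """
--
--     :param t: 每个服务器处理的时间
--     :param n: 任务个数
--     :return: 各个服务器执行完任务所需的时间
--     """
--     if t is None or n <= 0:
--         return None
--     m = len(t)
--     proTime = [0] * m
--     i = 1
--     while i <= n:
--         minTime = proTime[0] + t[0]  # 把任务给第j个机器后这个机器的执行时间
--         minIndex = 0
--         j = 1  # 从第二个进行比较,如果是0 ,则会与自身比较一次
--         while j < m: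
--             # 分配到第j台机器上后执行时间更短
--             if minTime > proTime[j] + t[j]:  # 最短时间  与   已经分配任务的时间+此任务需要的时间    两者相比较
--                 minTime = proTime[j] + t[j]
--                 minIndex = j
--             j += 1
--         proTime[minIndex] += t[minIndex]
--         i += 1
--     return proTime
-- ===== SOURCE B (Python) =====
-- def _insert_sorted(x, queue):
--     """Insert pair x into a lexicographically sorted list of pairs."""
--     for i, y in enumerate(queue):
--         if x < y:
--             return queue[:i] + [x] + queue[i:]
--     return queue + [x]
--
--
-- def calculate_process_time(t, n):
--     if t is None or n <= 0:
--         return None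
--     # event queue of (load-after-next-task, server-index), kept sorted
--     queue = []
--     for j, c in enumerate(t):
--         queue = _insert_sorted((c, j), queue)
--     pro = [0] * len(t)
--     for _ in range(n):
--         load, j = queue[0]
--         pro[j] = load
--         queue = _insert_sorted((load + t[j], j), queue[1:])
--     return pro
-- ===== Notes on version B (the rewrite author's own statement) =====
-- stated objective: alternative
-- what changed: B replaces A's per-task inner argmin scan over all machines by a sorted event queue of (next-finish-load, server-index) pairs: each task pops the queue head in O(1), writes its load into the answer directly, and reinserts the server's updated pair into the sorted queue.
import Mathlib
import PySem

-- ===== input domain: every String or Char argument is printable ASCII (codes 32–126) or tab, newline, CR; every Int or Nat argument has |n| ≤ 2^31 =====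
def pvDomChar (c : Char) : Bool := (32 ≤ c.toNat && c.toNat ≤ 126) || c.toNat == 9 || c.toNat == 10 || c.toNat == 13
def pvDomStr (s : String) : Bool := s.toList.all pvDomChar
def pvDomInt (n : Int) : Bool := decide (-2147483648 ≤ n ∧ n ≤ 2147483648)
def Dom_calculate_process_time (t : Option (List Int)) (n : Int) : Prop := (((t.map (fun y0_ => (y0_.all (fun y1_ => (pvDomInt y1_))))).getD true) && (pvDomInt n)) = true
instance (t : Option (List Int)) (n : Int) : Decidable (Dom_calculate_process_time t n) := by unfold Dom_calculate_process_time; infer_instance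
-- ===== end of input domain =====

-- B replaces A's per-task linear argmin scan by a sorted event queue of (next-load, server)
-- pairs: pop the head, assign its load directly, reinsert the updated pair (alternative
-- data structure, same results).

-- ===== PORT A =====
-- one iteration of A's outer while-loop: inner argmin scan over j = 1..m-1, then the update
def pvAStep (t pro : List Int) : List Int :=
  let r := (PySem.List.pyRange 1 (t.length : Int) 1).foldl
      (fun (s : Int × Int) j =>
        if s.1 > PySem.List.pyGetD pro j 0 + PySem.List.pyGetD t j 0
        then (PySem.List.pyGetD pro j 0 + PySem.List.pyGetD t j 0, j) else s)
      (PySem.List.pyGetD pro 0 0 + PySem.List.pyGetD t 0 0, 0)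
  pro.set r.2.toNat (PySem.List.pyGetD pro r.2 0 + PySem.List.pyGetD t r.2 0)

def pvALoop (t : List Int) : Nat → List Int → List Int
  | 0, pro => pro
  | k+1, pro => pvALoop t k (pvAStep t pro)

def calculate_process_time (t : Option (List Int)) (n : Int) : Option (List Int) :=
  match t with
  | none => none
  | some ts =>
    if n ≤ 0 then none
    else some (pvALoop ts n.toNat (List.replicate ts.length 0))

-- ===== PORT B =====
-- Python tuple comparison (a, b) < (c, d), lexicographic
def pvLexLt (a b : Int × Int) : Bool := a.1 < b.1 || (a.1 == b.1 && a.2 < b.2)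

-- Source B's _insert_sorted
def pvInsertSorted (x : Int × Int) : List (Int × Int) → List (Int × Int)
  | [] => [x]
  | y :: ys => if pvLexLt x y then x :: y :: ys else y :: pvInsertSorted x ys

-- one iteration of Source B's for-loop: pop head, write its load, reinsert updated pair
def pvBStep (t : List Int) (s : List Int × List (Int × Int)) : List Int × List (Int × Int) :=
  match s.2 with
  | [] => s
  | (load, j) :: rest =>
      (s.1.set j.toNat load, pvInsertSorted (load + PySem.List.pyGetD t j 0, j) rest)

def pvBLoop (t : List Int) : Nat → List Int × List (Int × Int) → List Int × List (Int × Int)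
  | 0, s => s
  | k+1, s => pvBLoop t k (pvBStep t s)

def calculate_process_time_alt (t : Option (List Int)) (n : Int) : Option (List Int) :=
  match t with
  | none => none
  | some ts =>
    if n ≤ 0 then none
    else
      let queue := (PySem.List.pyRange 0 (ts.length : Int) 1).foldl
        (fun q j => pvInsertSorted (PySem.List.pyGetD ts j 0, j) q) []
      some (pvBLoop ts n.toNat (List.replicate ts.length 0, queue)).1

-- ===== PRECONDITION & SPEC =====
-- Pre_ excludes only t = some [] with n > 0, where the Python A (and B) raise IndexError.
def Pre_calculate_process_time (t : Option (List Int)) (n : Int) : Prop :=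
  ¬ (t = some [] ∧ 0 < n)
instance (t : Option (List Int)) (n : Int) : Decidable (Pre_calculate_process_time t n) := by
  unfold Pre_calculate_process_time; infer_instance

def pvWitness_calculate_process_time : Option (List Int) × Int := (some [2, 1], 3)

def Spec_calculate_process_time (t : Option (List Int)) (n : Int) (out : Option (List Int)) : Prop := out = calculate_process_time_alt t n
instance (t : Option (List Int)) (n : Int) (out : Option (List Int)) : Decidable (Spec_calculate_process_time t n out) := by unfold Spec_calculate_process_time; infer_instance

-- ===== CLAIM (what is proved, stated in full; the proofs are below) =====
def Claim_equal_calculate_process_time : Prop := ∀ (t : Option (List Int)) (n : Int), Dom_calculate_process_time t n → Pre_calculate_process_time t n → Spec_calculate_process_time t n (calculate_process_time t n)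

-- ===== LEMMAS AND PROOFS =====

-- the pair A's scan compares at machine index j
def pvG (t pro : List Int) (j : Int) : Int × Int :=
  (PySem.List.pyGetD pro j 0 + PySem.List.pyGetD t j 0, j)

-- the multiset of pairs B's queue holds when processing times are pro
def pvKeys (t pro : List Int) : List (Int × Int) :=
  (List.range t.length).map (fun (k : Nat) => pvG t pro (k : Int))

-- a ≤ b in the lexicographic order
def pvLe (a b : Int × Int) : Prop := pvLexLt b a = false

def pvInv (t pro : List Int) (q : List (Int × Int)) : Prop :=
  q.Pairwise pvLe ∧ q.Perm (pvKeys t pro)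

lemma pvLe_refl (a : Int × Int) : pvLe a a := by
  simp [pvLe, pvLexLt]

lemma pvLe_antisymm {a b : Int × Int} (h1 : pvLe a b) (h2 : pvLe b a) : a = b := by
  obtain ⟨a1, a2⟩ := a; obtain ⟨b1, b2⟩ := b
  simp only [pvLe, pvLexLt, Bool.or_eq_false_iff, Bool.and_eq_false_iff,
    decide_eq_false_iff_not, beq_eq_false_iff_ne, not_lt, Prod.mk.injEq] at *
  exact ⟨by omega, by omega⟩

lemma pvLe_trans {a b c : Int × Int} (h1 : pvLe a b) (h2 : pvLe b c) : pvLe a c := by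
  obtain ⟨a1, a2⟩ := a; obtain ⟨b1, b2⟩ := b; obtain ⟨c1, c2⟩ := c
  simp only [pvLe, pvLexLt, Bool.or_eq_false_iff, Bool.and_eq_false_iff,
    decide_eq_false_iff_not, beq_eq_false_iff_ne, not_lt] at *
  rcases h1.2 with h | h <;> rcases h2.2 with h' | h' <;>
    refine ⟨by omega, ?_⟩ <;> omega

lemma pvLexLt_imp_le {a b : Int × Int} (h : pvLexLt a b = true) : pvLe a b := by
  obtain ⟨a1, a2⟩ := a; obtain ⟨b1, b2⟩ := b
  simp only [pvLe, pvLexLt, Bool.or_eq_true, Bool.and_eq_true, decide_eq_true_eq, beq_iff_eq,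
    Bool.or_eq_false_iff, Bool.and_eq_false_iff, decide_eq_false_iff_not,
    beq_eq_false_iff_ne, not_lt] at *
  rcases h with h | ⟨h, h'⟩ <;> constructor <;> omega

lemma pvLexLt_false_imp_le {a b : Int × Int} (h : pvLexLt a b = false) : pvLe b a := h

lemma pvInsertSorted_perm (x : Int × Int) (q : List (Int × Int)) :
    (pvInsertSorted x q).Perm (x :: q) := by
  induction q with
  | nil => simp [pvInsertSorted]
  | cons y ys ih =>
    simp only [pvInsertSorted]
    split
    · exact List.Perm.refl _
    · exact ((ih.cons y).trans (List.Perm.swap x y ys))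

lemma pvInsertSorted_pairwise (x : Int × Int) (q : List (Int × Int))
    (h : q.Pairwise pvLe) : (pvInsertSorted x q).Pairwise pvLe := by
  induction q with
  | nil => simp [pvInsertSorted]
  | cons y ys ih =>
    rcases List.pairwise_cons.mp h with ⟨hy, hys⟩
    simp only [pvInsertSorted]
    split
    · rename_i hlt
      refine List.pairwise_cons.mpr ⟨?_, h⟩
      intro z hz
      rcases List.mem_cons.mp hz with rfl | hz
      · exact pvLexLt_imp_le hlt
      · exact pvLe_trans (pvLexLt_imp_le hlt) (hy z hz)
    · rename_i hlt
      have hyx : pvLe y x := pvLexLt_false_imp_le (by simpa using hlt)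
      refine List.pairwise_cons.mpr ⟨?_, ih hys⟩
      intro z hz
      have := (pvInsertSorted_perm x ys).mem_iff.mp hz
      rcases List.mem_cons.mp this with rfl | hz'
      · exact hyx
      · exact hy z hz'

-- B's queue build: a fold of sorted inserts is a sorted permutation of the pushed pairs
lemma pvFoldInsert_perm (g : Int → Int × Int) (js : List Int) (q : List (Int × Int)) :
    (js.foldl (fun q j => pvInsertSorted (g j) q) q).Perm (q ++ js.map g) := by
  induction js generalizing q with
  | nil => simp
  | cons j js ih =>
    simp only [List.foldl_cons, List.map_cons]
    refine (ih _).trans ?_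
    have h1 : (pvInsertSorted (g j) q ++ js.map g).Perm ((g j :: q) ++ js.map g) :=
      (pvInsertSorted_perm (g j) q).append_right _
    exact h1.trans List.perm_middle.symm

lemma pvFoldInsert_pairwise (g : Int → Int × Int) (js : List Int) (q : List (Int × Int))
    (h : q.Pairwise pvLe) :
    (js.foldl (fun q j => pvInsertSorted (g j) q) q).Pairwise pvLe := by
  induction js generalizing q with
  | nil => exact h
  | cons j js ih => exact ih _ (pvInsertSorted_pairwise _ _ h)

-- A's scan computes a lexicographic minimum of the compared pairs
lemma pvScan_min (g : Int → Int × Int) (hg : ∀ j, (g j).2 = j)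
    (js : List Int) (s : Int × Int)
    (hlt : ∀ j ∈ js, s.2 < j) (hp : js.Pairwise (· < ·)) :
    (js.foldl (fun s j => if s.1 > (g j).1 then g j else s) s = s ∨
      ∃ j ∈ js, js.foldl (fun s j => if s.1 > (g j).1 then g j else s) s = g j) ∧
    pvLe (js.foldl (fun s j => if s.1 > (g j).1 then g j else s) s) s ∧
    ∀ j ∈ js, pvLe (js.foldl (fun s j => if s.1 > (g j).1 then g j else s) s) (g j) := by
  induction js generalizing s with
  | nil => exact ⟨Or.inl rfl, pvLe_refl s, by simp⟩
  | cons j js ih =>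
    rcases List.pairwise_cons.mp hp with ⟨hj, hp'⟩
    simp only [List.foldl_cons]
    by_cases hc : s.1 > (g j).1
    · simp only [if_pos hc]
      have hlt' : ∀ i ∈ js, (g j).2 < i := by
        intro i hi; rw [hg j]; exact hj i hi
      obtain ⟨hmem, hle, hall⟩ := ih (g j) hlt' hp'
      refine ⟨?_, ?_, ?_⟩
      · rcases hmem with h | ⟨i, hi, h⟩
        · exact Or.inr ⟨j, List.mem_cons_self, h⟩
        · exact Or.inr ⟨i, List.mem_cons_of_mem _ hi, h⟩
      · refine pvLe_trans hle ?_
        simp only [gt_iff_lt] at hc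
        simp only [pvLe, pvLexLt, Bool.or_eq_false_iff, Bool.and_eq_false_iff,
          decide_eq_false_iff_not, beq_eq_false_iff_ne, not_lt]
        exact ⟨by omega, Or.inl (by omega)⟩
      · intro i hi
        rcases List.mem_cons.mp hi with rfl | hi
        · exact hle
        · exact hall i hi
    · simp only [if_neg hc]
      have hlt' : ∀ i ∈ js, s.2 < i := fun i hi => hlt i (List.mem_cons_of_mem _ hi)
      obtain ⟨hmem, hle, hall⟩ := ih s hlt' hp'
      refine ⟨?_, hle, ?_⟩
      · rcases hmem with h | ⟨i, hi, h⟩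
        · exact Or.inl h
        · exact Or.inr ⟨i, List.mem_cons_of_mem _ hi, h⟩
      · intro i hi
        rcases List.mem_cons.mp hi with rfl | hi
        · refine pvLe_trans hle ?_
          have hsj := hlt i List.mem_cons_self
          simp only [gt_iff_lt, not_lt] at hc
          have hgi := hg i
          simp only [pvLe, pvLexLt, Bool.or_eq_false_iff, Bool.and_eq_false_iff,
            decide_eq_false_iff_not, beq_eq_false_iff_ne, not_lt]
          exact ⟨by omega, Or.inr (by omega)⟩
        · exact hall i hi

lemma pvKeys_mem_iff (t pro : List Int) (p : Int × Int) :
    p ∈ pvKeys t pro ↔ ∃ k : Nat, k < t.length ∧ p = pvG t pro (k : Int) := by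
  simp [pvKeys, eq_comm]

-- the scanned fold's result is the head of any sorted permutation of pvKeys
lemma pvScan_eq_head (t pro : List Int) (hm : t ≠ [])
    (q : List (Int × Int)) (hq : pvInv t pro q) (h0 : Int × Int) (rest : List (Int × Int))
    (hcons : q = h0 :: rest) :
    ((PySem.List.pyRange 1 (t.length : Int) 1).foldl
      (fun (s : Int × Int) j =>
        if s.1 > PySem.List.pyGetD pro j 0 + PySem.List.pyGetD t j 0
        then (PySem.List.pyGetD pro j 0 + PySem.List.pyGetD t j 0, j) else s)
      (PySem.List.pyGetD pro 0 0 + PySem.List.pyGetD t 0 0, 0)) = h0 := by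
  obtain ⟨hsort, hperm⟩ := hq
  have hm0 : 0 < t.length := List.length_pos_iff.mpr hm
  have hgsnd : ∀ j : Int, (pvG t pro j).2 = j := fun _ => rfl
  have hlt : ∀ j ∈ PySem.List.pyRange 1 (t.length : Int) 1, ((pvG t pro 0).2) < j := by
    intro j hj
    have := PySem.List.mem_pyRange_one.mp hj
    show (0 : Int) < j
    omega
  obtain ⟨hmem, hle0, hall⟩ := pvScan_min (pvG t pro) hgsnd
    (PySem.List.pyRange 1 (t.length : Int) 1) (pvG t pro 0) hlt
    (PySem.List.pairwise_lt_pyRange_one 1 (t.length : Int))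
  show (PySem.List.pyRange 1 (t.length : Int) 1).foldl
      (fun s j => if s.1 > (pvG t pro j).1 then pvG t pro j else s) (pvG t pro 0) = h0
  set r := (PySem.List.pyRange 1 (t.length : Int) 1).foldl
      (fun s j => if s.1 > (pvG t pro j).1 then pvG t pro j else s) (pvG t pro 0) with hr
  have hrK : r ∈ pvKeys t pro := by
    rcases hmem with h | ⟨j, hj, h⟩
    · exact (pvKeys_mem_iff t pro r).mpr ⟨0, hm0, by rw [h]; norm_num⟩
    · have hb := PySem.List.mem_pyRange_one.mp hj
      refine (pvKeys_mem_iff t pro r).mpr ⟨j.toNat, by omega, ?_⟩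
      rw [h, Int.toNat_of_nonneg (by omega)]
  have hrMin : ∀ p ∈ pvKeys t pro, pvLe r p := by
    intro p hp
    obtain ⟨k, hk, rfl⟩ := (pvKeys_mem_iff t pro p).mp hp
    rcases Nat.eq_zero_or_pos k with rfl | hk0
    · simpa using hle0
    · exact hall _ (PySem.List.mem_pyRange_one.mpr ⟨by omega, by omega⟩)
  have hh0K : h0 ∈ pvKeys t pro := hperm.mem_iff.mp (by rw [hcons]; exact List.mem_cons_self)
  have hh0Min : ∀ p ∈ pvKeys t pro, pvLe h0 p := by
    intro p hp
    have hpq : p ∈ q := hperm.mem_iff.mpr hp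
    rw [hcons] at hpq hsort
    rcases List.mem_cons.mp hpq with rfl | hp'
    · exact pvLe_refl p
    · exact (List.pairwise_cons.mp hsort).1 p hp'
  exact pvLe_antisymm (hrMin h0 hh0K) (hh0Min r hrK)

lemma pvKeys_set (t pro : List Int) (k : Nat) (v : Int) (hk : k < t.length)
    (hlen : pro.length = t.length) :
    pvKeys t (pro.set k v) =
      (pvKeys t pro).set k (v + PySem.List.pyGetD t (k : Int) 0, (k : Int)) := by
  apply List.ext_getElem
  · simp [pvKeys]
  · intro i h1 h2
    have hi : i < t.length := by simpa [pvKeys] using h1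
    have hipro : i < pro.length := by omega
    simp only [pvKeys, List.getElem_set, List.getElem_map, List.getElem_range, pvG,
      PySem.List.pyGetD_natCast]
    have hgd : ∀ (l : List Int) (hidx : i < l.length), l.getD i 0 = l[i] := by
      intro l hidx
      simp [List.getD_eq_getElem?_getD, List.getElem?_eq_getElem hidx]
    by_cases hik : k = i
    · subst hik
      rw [if_pos rfl, hgd (pro.set k v) (by simpa using hipro), List.getElem_set_self]
    · rw [if_neg hik, hgd (pro.set k v) (by simpa using hipro),
        hgd pro hipro, List.getElem_set_ne hik]

-- the step lemma: given the invariant, one B step is one A step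
lemma pvStep (t pro : List Int) (q : List (Int × Int)) (hm : t ≠ [])
    (hpro : pro.length = t.length) (hq : pvInv t pro q) :
    (pvBStep t (pro, q)).1 = pvAStep t pro ∧
    (pvBStep t (pro, q)).1.length = t.length ∧
    pvInv t (pvBStep t (pro, q)).1 (pvBStep t (pro, q)).2 := by
  have hm0 : 0 < t.length := List.length_pos_iff.mpr hm
  obtain ⟨hsort, hperm⟩ := hq
  rcases q with _ | ⟨⟨load, j⟩, rest⟩
  · have := hperm.length_eq
    simp [pvKeys] at this
    omega
  have hh0K : (load, j) ∈ pvKeys t pro := hperm.mem_iff.mp List.mem_cons_self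
  obtain ⟨k, hk, hpair⟩ := (pvKeys_mem_iff t pro _).mp hh0K
  have hj : j = (k : Int) := congrArg Prod.snd hpair
  have hload : load = PySem.List.pyGetD pro (k : Int) 0 + PySem.List.pyGetD t (k : Int) 0 :=
    congrArg Prod.fst hpair
  subst hj
  have hhead := pvScan_eq_head t pro hm _ ⟨hsort, hperm⟩ (load, (k : Int)) rest rfl
  have hB : pvBStep t (pro, (load, (k : Int)) :: rest) =
      (pro.set k load, pvInsertSorted (load + PySem.List.pyGetD t (k : Int) 0, (k : Int)) rest) := by
    simp [pvBStep]
  have hA : pvAStep t pro = pro.set k load := by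
    unfold pvAStep
    rw [hhead]
    simp [hload]
  refine ⟨by rw [hB, hA], by simp [hB, hpro], ?_⟩
  rw [hB]
  constructor
  · exact pvInsertSorted_pairwise _ _ (List.pairwise_cons.mp hsort).2
  · -- permutation part
    have hkk : k < (pvKeys t pro).length := by simpa [pvKeys] using hk
    have hKk : (pvKeys t pro)[k] = (load, (k : Int)) := by
      simp only [pvKeys, List.getElem_map, List.getElem_range]
      exact hpair.symm
    have hKsplit : pvKeys t pro =
        (pvKeys t pro).take k ++ (load, (k : Int)) :: (pvKeys t pro).drop (k + 1) := by
      conv_lhs => rw [← List.take_append_drop k (pvKeys t pro), List.drop_eq_getElem_cons hkk, hKk]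
    have hrest : rest.Perm ((pvKeys t pro).take k ++ (pvKeys t pro).drop (k + 1)) := by
      have h1 : ((load, (k : Int)) :: rest).Perm (pvKeys t pro) := hperm
      rw [hKsplit] at h1
      exact (h1.trans List.perm_middle).cons_inv
    have hset : pvKeys t (pro.set k load) =
        (pvKeys t pro).set k (load + PySem.List.pyGetD t (k : Int) 0, (k : Int)) :=
      pvKeys_set t pro k load hk hpro
    rw [hset, List.set_eq_take_cons_drop _ hkk]
    refine (pvInsertSorted_perm _ rest).trans ?_
    exact (hrest.cons _).trans List.perm_middle.symm

lemma pvLoop (t : List Int) (hm : t ≠ []) : ∀ (k : Nat) (pro : List Int)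
    (q : List (Int × Int)), pro.length = t.length → pvInv t pro q →
    (pvBLoop t k (pro, q)).1 = pvALoop t k pro := by
  intro k
  induction k with
  | zero => intro pro q _ _; rfl
  | succ k ih =>
    intro pro q hlen hq
    obtain ⟨heq, hlen', hinv⟩ := pvStep t pro q hm hlen hq
    show (pvBLoop t k (pvBStep t (pro, q))).1 = pvALoop t k (pvAStep t pro)
    rw [← heq]
    have := ih (pvBStep t (pro, q)).1 (pvBStep t (pro, q)).2 (heq ▸ hlen') hinv
    simpa using this

lemma pvInit (t : List Int) :
    pvInv t (List.replicate t.length 0)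
      ((PySem.List.pyRange 0 (t.length : Int) 1).foldl
        (fun q j => pvInsertSorted (PySem.List.pyGetD t j 0, j) q) []) := by
  constructor
  · exact pvFoldInsert_pairwise (fun j => (PySem.List.pyGetD t j 0, j)) _ [] List.Pairwise.nil
  · refine (pvFoldInsert_perm (fun j => (PySem.List.pyGetD t j 0, j)) _ []).trans ?_
    rw [List.nil_append]
    have : (PySem.List.pyRange 0 (t.length : Int) 1).map
        (fun j => (PySem.List.pyGetD t j 0, j)) = pvKeys t (List.replicate t.length 0) := by
      rw [PySem.List.pyRange_zero_nat, List.map_map]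
      unfold pvKeys
      apply List.map_congr_left
      intro k hk
      have h0 : (List.replicate t.length (0 : Int)).getD k 0 = 0 := by
        simp [List.getD_eq_getElem?_getD, List.getElem?_replicate]
        split <;> rfl
      simp [pvG, PySem.List.pyGetD_natCast, h0]
    rw [this]

-- ===== VERDICT (by name: the statement is the Claim_ definition above) =====
theorem calculate_process_time_spec : Claim_equal_calculate_process_time := by
  intro t n _ hpre
  unfold Spec_calculate_process_time
  match t with
  | none => rfl
  | some ts =>
    simp only [calculate_process_time, calculate_process_time_alt]
    by_cases hn : n ≤ 0
    · simp [hn]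
    · simp only [if_neg hn]
      have hts : ts ≠ [] := by
        intro h
        exact hpre ⟨by rw [h], by omega⟩
      rw [pvLoop ts hts n.toNat (List.replicate ts.length 0) _ (by simp) (pvInit ts)]
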